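-- pv_equiv track=rewrite | github.com/HimadriSahu/zoefit-backend | zoefit/ai_features/ai_engine.py | _filter_by_medical_conditions
-- ===== SOURCE A (Python) =====
-- from typing import Dict, List, Any
--
-- def _filter_by_medical_conditions(templates: List[Dict],
--                                 conditions: List) -> List[Dict]:
--     """
--     Filter meal templates based on medical conditions.
--     """
--     filtered_templates = []
--
--     for template in templates:
--         suitable = True
--
--         # Check for condition-specific restrictions
--         if 'diabetes' in conditions:
--             if template.get('high_glycemic', False):
--                 suitable = False
--
--         if 'hypertension' in conditions:
--             if template.get('high_sodium', False):
--                 suitable = False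
--
--         if 'heart_disease' in conditions:
--             if template.get('high_saturated_fat', False):
--                 suitable = False
--
--         if suitable:
--             filtered_templates.append(template)
--
--     return filtered_templates
-- ===== SOURCE B (Python) =====
-- from typing import Dict, List, Any
--
-- def _filter_by_medical_conditions(templates: List[Dict],
--                                 conditions: List) -> List[Dict]:
--     """Filter meal templates by successive whole-list passes, one per active condition."""
--     result = list(templates)
--     for cond, flag in (('diabetes', 'high_glycemic'),
--                        ('hypertension', 'high_sodium'),
--                        ('heart_disease', 'high_saturated_fat')):
--         if cond in conditions:
--             result = [t for t in result if not t.get(flag, False)]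
--     return result
-- ===== Notes on version B (the rewrite author's own statement) =====
-- stated objective: alternative
-- what changed: A makes one pass over templates with three hard-coded branches mutating a 'suitable' flag per item; B inverts the loop nesting: it iterates over a condition->flag table and, for each active condition, performs a whole-list comprehension pass over the surviving templates (staged passes), which drops the per-item condition membership tests and branch bookkeeping.
import Mathlib
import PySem

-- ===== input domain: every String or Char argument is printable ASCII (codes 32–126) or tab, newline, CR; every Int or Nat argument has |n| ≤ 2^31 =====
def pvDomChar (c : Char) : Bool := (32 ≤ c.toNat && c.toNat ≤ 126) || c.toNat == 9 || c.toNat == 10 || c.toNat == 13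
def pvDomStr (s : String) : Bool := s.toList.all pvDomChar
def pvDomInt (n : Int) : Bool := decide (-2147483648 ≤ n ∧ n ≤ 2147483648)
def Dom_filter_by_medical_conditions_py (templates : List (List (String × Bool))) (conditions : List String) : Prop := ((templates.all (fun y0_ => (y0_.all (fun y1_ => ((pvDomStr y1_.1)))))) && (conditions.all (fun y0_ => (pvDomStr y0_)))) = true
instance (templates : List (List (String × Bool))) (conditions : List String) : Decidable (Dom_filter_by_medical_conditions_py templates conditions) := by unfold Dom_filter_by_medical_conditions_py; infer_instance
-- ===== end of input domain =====

-- B inverts the loop nesting: a fold over a condition→flag table makes one whole-list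
-- filtering pass per active condition, instead of A's single template loop with three
-- branches mutating a 'suitable' flag (alternative decomposition, same cost).

-- ===== PORT A =====
-- the loop body's 'suitable' flag, computed exactly as A does (three sequential branches)
def pvSuitableA (conditions : List String) (template : List (String × Bool)) : Bool :=
  let suitable := true
  let suitable := if conditions.contains "diabetes" then
      (if (PySem.Dict.mk template).getD "high_glycemic" false then false else suitable)
    else suitable
  let suitable := if conditions.contains "hypertension" then
      (if (PySem.Dict.mk template).getD "high_sodium" false then false else suitable)
    else suitable
  let suitable := if conditions.contains "heart_disease" then
      (if (PySem.Dict.mk template).getD "high_saturated_fat" false then false else suitable)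
    else suitable
  suitable

def filter_by_medical_conditions_py (templates : List (List (String × Bool))) (conditions : List String) : List (List (String × Bool)) :=
  templates.foldl (fun filtered_templates template =>
    if pvSuitableA conditions template then filtered_templates ++ [template]
    else filtered_templates) []

-- ===== PORT B =====
def pvRestrictionMap : List (String × String) :=
  [("diabetes", "high_glycemic"), ("hypertension", "high_sodium"), ("heart_disease", "high_saturated_fat")]

def filter_by_medical_conditions_py_alt (templates : List (List (String × Bool))) (conditions : List String) : List (List (String × Bool)) :=
  pvRestrictionMap.foldl (fun result p =>
    if conditions.contains p.1 then
      result.filter (fun t => !((PySem.Dict.mk t).getD p.2 false))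
    else result) templates

-- ===== PRECONDITION & SPEC =====
def Spec_filter_by_medical_conditions_py (templates : List (List (String × Bool))) (conditions : List String) (out : List (List (String × Bool))) : Prop := out = filter_by_medical_conditions_py_alt templates conditions
instance (templates : List (List (String × Bool))) (conditions : List String) (out : List (List (String × Bool))) : Decidable (Spec_filter_by_medical_conditions_py templates conditions out) := by unfold Spec_filter_by_medical_conditions_py; infer_instance

-- ===== CLAIM (what is proved, stated in full; the proofs are below) =====
def Claim_equal_filter_by_medical_conditions_py : Prop := ∀ (templates : List (List (String × Bool))) (conditions : List String), Dom_filter_by_medical_conditions_py templates conditions → Spec_filter_by_medical_conditions_py templates conditions (filter_by_medical_conditions_py templates conditions)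

-- ===== LEMMAS AND PROOFS =====
-- A's 'suitable' flag is the conjunction of the three per-condition non-flag tests.
theorem pv_suit_eq (conditions : List String) (t : List (String × Bool)) :
    pvSuitableA conditions t
      = (!(conditions.contains "diabetes" && (PySem.Dict.mk t).getD "high_glycemic" false)
         && !(conditions.contains "hypertension" && (PySem.Dict.mk t).getD "high_sodium" false)
         && !(conditions.contains "heart_disease" && (PySem.Dict.mk t).getD "high_saturated_fat" false)) := by
  unfold pvSuitableA
  cases conditions.contains "diabetes" <;>
    cases conditions.contains "hypertension" <;>
      cases conditions.contains "heart_disease" <;>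
        cases (PySem.Dict.mk t).getD "high_glycemic" false <;>
          cases (PySem.Dict.mk t).getD "high_sodium" false <;>
            cases (PySem.Dict.mk t).getD "high_saturated_fat" false <;> simp

-- B's staged passes compose to the single filter by that conjunction.
theorem pv_staged_eq (templates : List (List (String × Bool))) (conditions : List String) :
    filter_by_medical_conditions_py_alt templates conditions
      = templates.filter (pvSuitableA conditions) := by
  unfold filter_by_medical_conditions_py_alt pvRestrictionMap
  simp only [List.foldl]
  cases hd : conditions.contains "diabetes" <;>
    cases hh : conditions.contains "hypertension" <;>
      cases hc : conditions.contains "heart_disease" <;>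
        simp [List.filter_filter, pv_suit_eq, hd, hh, hc,
              Bool.and_comm, Bool.and_left_comm, Bool.and_assoc] <;>
        first
          | exact (List.filter_eq_self.mpr (fun t _ => by rw [pv_suit_eq, hd, hh, hc]; simp)).symm
          | exact List.filter_congr (fun t _ => by
              rw [pv_suit_eq, hd, hh, hc]
              cases (PySem.Dict.mk t).getD "high_glycemic" false <;>
                cases (PySem.Dict.mk t).getD "high_sodium" false <;>
                  cases (PySem.Dict.mk t).getD "high_saturated_fat" false <;> simp)

-- ===== VERDICT (by name: the statement is the Claim_ definition above) =====
theorem filter_by_medical_conditions_py_spec : Claim_equal_filter_by_medical_conditions_py := by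
  intro templates conditions _
  unfold Spec_filter_by_medical_conditions_py filter_by_medical_conditions_py
  rw [PySem.List.foldl_append_ite_eq_filter, pv_staged_eq]
  simp
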